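-- pv_equiv track=rewrite | github.com/liupengsay/PyIsTheBestLang | src/mathmatics/high_precision/template.py | decimal_to_fraction
-- ===== SOURCE A (Python) =====
-- import math
--
-- def decimal_to_fraction(st):
--     # Decimal to Fraction
--     def sum_fraction(tmp):
--         mu = tmp[0][1]
--         for ls in tmp[1:]:
--             mu = math.lcm(mu, ls[1])
--         zi = sum(ls[0] * mu // ls[1] for ls in tmp)
--         mz = math.gcd(mu, zi)
--         return [zi // mz, mu // mz]
--
--     # Converting rational numbers or infinite recurring decimals to fractions
--     if "." in st:
--         lst = st.split(".")
--         integer = [int(lst[0]), 1] if lst[0] else [0, 1]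
--         if "(" not in lst[1]:
--             non_repeat = [int(lst[1]), 10 ** len(lst[1])
--                           ] if lst[1] else [0, 1]
--             repeat = [0, 1]
--         else:
--             pre, post = lst[1].split("(")
--             non_repeat = [int(pre), 10 ** len(pre)] if pre else [0, 1]
--             post = post[:-1]
--             repeat = [int(post), int("9" * len(post)) * 10 ** len(pre)]
--     else:
--
--         integer = [int(st), 1]
--         non_repeat = [0, 1]
--         repeat = [0, 1]
--     return sum_fraction([integer, non_repeat, repeat])
-- ===== SOURCE B (Python) =====
-- import math
--
--
-- def decimal_to_fraction(st):
--     # Closed-form single-denominator rebuild: instead of three fractions summed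
--     # through an lcm fold, build one denominator and numerator directly and
--     # reduce once with a single gcd.
--     num, den = 0, 1
--     if "." in st:
--         lst = st.split(".")
--         whole, frac = lst[0], lst[1]
--         i_val = int(whole) if whole else 0
--         if "(" in frac:
--             pre, post = frac.split("(")
--             post = post[:-1]
--             p_val = int(pre) if pre else 0
--             q_val = int(post)
--             nines = int("9" * len(post))
--             den = nines * 10 ** len(pre)
--             num = i_val * den + p_val * nines + q_val
--         else:
--             f_val = int(frac) if frac else 0
--             if frac:
--                 den = 10 ** len(frac)
--             num = i_val * den + f_val
--     else:
--         num = int(st)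
--     g = math.gcd(num, den)
--     return [num // g, den // g]
-- ===== Notes on version B (the rewrite author's own statement) =====
-- stated objective: simpler
-- what changed: A sums three separate fractions through an lcm fold, a generator sum of exact divisions and a final gcd; B builds the single denominator (nines times a power of ten) and the numerator in closed form directly from the parsed pieces and reduces once with one gcd.
import Mathlib
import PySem

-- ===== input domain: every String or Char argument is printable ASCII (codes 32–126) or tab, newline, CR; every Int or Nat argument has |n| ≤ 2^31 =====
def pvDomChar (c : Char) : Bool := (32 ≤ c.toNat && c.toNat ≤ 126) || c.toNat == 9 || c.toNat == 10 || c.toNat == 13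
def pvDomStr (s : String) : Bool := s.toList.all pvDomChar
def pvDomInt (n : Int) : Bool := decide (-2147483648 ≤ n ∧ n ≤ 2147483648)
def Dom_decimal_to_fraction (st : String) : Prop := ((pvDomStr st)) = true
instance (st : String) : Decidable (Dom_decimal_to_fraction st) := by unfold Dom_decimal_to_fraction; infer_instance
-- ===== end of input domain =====

-- B replaces A's three-fraction lcm-fold-and-sum by a closed-form single denominator and
-- numerator reduced with one gcd (objective: simpler; same asymptotic cost).

-- ===== PORT A =====

-- int("9" * n): ported by hand as Python's left-to-right digit scan over the n '9'
-- characters — exact, because the scanned string consists of digit characters only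
-- (for n = 0 Python raises ValueError on int(""); that lies outside Pre_ below).
def pvNines (n : Nat) : Int :=
  (List.replicate n '9').foldl (fun a c => a * 10 + ((c.toNat : Int) - 48)) 0

-- helper sum_fraction of A (pairs [zi, mu] as Int × Int)
def pvSumFraction (tmp : List (Int × Int)) : List Int :=
  match tmp with
  | [] => []   -- Python raises IndexError on tmp[0]; never reached (A always passes 3 pairs)
  | h :: t =>
    let mu : Int := t.foldl (fun mu ls => ((Int.lcm mu ls.2 : Nat) : Int)) h.2
    let zi : Int := ((h :: t).map (fun ls => PySem.Int.floordiv (ls.1 * mu) ls.2)).sum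
    let mz : Int := ((Int.gcd mu zi : Nat) : Int)
    [PySem.Int.floordiv zi mz, PySem.Int.floordiv mu mz]

def decimal_to_fraction (st : String) : List Int :=
  if PySem.Str.isIn "." st then
    let lst := (PySem.Str.split? st ".").getD []        -- sep "." ≠ "" so split? = some _
    let l0 := lst.headD ""                              -- lst[0] (split is nonempty)
    let l1 := (PySem.List.pyGet? lst 1).getD ""         -- lst[1] ("." in st gives ≥ 2 pieces)
    let integer : Int × Int := if l0 ≠ "" then ((PySem.Int.ofStr? l0).getD 0, 1) else (0, 1)
    if PySem.Str.isIn "(" l1 = false then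
      let non_repeat : Int × Int :=
        if l1 ≠ "" then ((PySem.Int.ofStr? l1).getD 0, 10 ^ (PySem.Str.len l1).toNat) else (0, 1)
      pvSumFraction [integer, non_repeat, (0, 1)]
    else
      let parts := (PySem.Str.split? l1 "(").getD []    -- the two-target unpacked split; Pre_ gives exactly 2 parts
      let pre := parts.headD ""
      let post := (PySem.List.pyGet? parts 1).getD ""
      let non_repeat : Int × Int :=
        if pre ≠ "" then ((PySem.Int.ofStr? pre).getD 0, 10 ^ (PySem.Str.len pre).toNat) else (0, 1)
      let post' := PySem.Str.slice post none (some (-1))    -- post = post[:-1]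
      let rep : Int × Int :=
        ((PySem.Int.ofStr? post').getD 0,
          pvNines (PySem.Str.len post').toNat * 10 ^ (PySem.Str.len pre).toNat)
      pvSumFraction [integer, non_repeat, rep]
  else
    pvSumFraction [((PySem.Int.ofStr? st).getD 0, 1), (0, 1), (0, 1)]

-- ===== PORT B =====
def decimal_to_fraction_alt (st : String) : List Int :=
  let nd : Int × Int :=
    if PySem.Str.isIn "." st then
      let lst := (PySem.Str.split? st ".").getD []
      let whole := lst.headD ""
      let frac := (PySem.List.pyGet? lst 1).getD ""
      let iVal : Int := if whole ≠ "" then (PySem.Int.ofStr? whole).getD 0 else 0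
      if PySem.Str.isIn "(" frac then
        let parts := (PySem.Str.split? frac "(").getD []
        let pre := parts.headD ""
        let post := PySem.Str.slice ((PySem.List.pyGet? parts 1).getD "") none (some (-1))
        let pVal : Int := if pre ≠ "" then (PySem.Int.ofStr? pre).getD 0 else 0
        let qVal : Int := (PySem.Int.ofStr? post).getD 0
        let nines : Int := pvNines (PySem.Str.len post).toNat
        let den : Int := nines * 10 ^ (PySem.Str.len pre).toNat
        (iVal * den + pVal * nines + qVal, den)
      else
        let fVal : Int := if frac ≠ "" then (PySem.Int.ofStr? frac).getD 0 else 0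
        let den : Int := if frac ≠ "" then 10 ^ (PySem.Str.len frac).toNat else 1
        (iVal * den + fVal, den)
    else
      ((PySem.Int.ofStr? st).getD 0, 1)
  let g : Int := ((Int.gcd nd.1 nd.2 : Nat) : Int)
  [PySem.Int.floordiv nd.1 g, PySem.Int.floordiv nd.2 g]

-- ===== PRECONDITION & SPEC =====
-- Pre_: exactly the inputs on which Python A returns (no exception): every piece fed to
-- int() must parse, and an opening parenthesis, when present in the fractional part,
-- must be unique (Python's two-target unpacking of the split raises ValueError otherwise).
def Pre_decimal_to_fraction (st : String) : Prop :=
  if PySem.Str.isIn "." st then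
    let lst := (PySem.Str.split? st ".").getD []
    let l0 := lst.headD ""
    let l1 := (PySem.List.pyGet? lst 1).getD ""
    (l0 = "" ∨ (PySem.Int.ofStr? l0).isSome = true) ∧
    (if PySem.Str.isIn "(" l1 then
      PySem.Str.count l1 "(" = 1 ∧
      (let parts := (PySem.Str.split? l1 "(").getD []
       let pre := parts.headD ""
       let post' := PySem.Str.slice ((PySem.List.pyGet? parts 1).getD "") none (some (-1))
       (pre = "" ∨ (PySem.Int.ofStr? pre).isSome = true) ∧
       (PySem.Int.ofStr? post').isSome = true)
     else (l1 = "" ∨ (PySem.Int.ofStr? l1).isSome = true))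
  else (PySem.Int.ofStr? st).isSome = true

instance (st : String) : Decidable (Pre_decimal_to_fraction st) := by
  unfold Pre_decimal_to_fraction; infer_instance

def pvWitness_decimal_to_fraction : String := "0.1(6)"

def Spec_decimal_to_fraction (st : String) (out : List Int) : Prop := out = decimal_to_fraction_alt st
instance (st : String) (out : List Int) : Decidable (Spec_decimal_to_fraction st out) := by unfold Spec_decimal_to_fraction; infer_instance

-- ===== CLAIM (what is proved, stated in full; the proofs are below) =====
def Claim_equal_decimal_to_fraction : Prop := ∀ (st : String), Dom_decimal_to_fraction st → Pre_decimal_to_fraction st → Spec_decimal_to_fraction st (decimal_to_fraction st)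

-- ===== LEMMAS AND PROOFS =====

-- B's final reduction step, as a proof-side abbreviation of the common shape
def pvReduce (num den : Int) : List Int :=
  [PySem.Int.floordiv num ((Int.gcd num den : Nat) : Int),
   PySem.Int.floordiv den ((Int.gcd num den : Nat) : Int)]

lemma pvNines_foldl (n : Nat) (a : Int) :
    (List.replicate n '9').foldl (fun a c => a * 10 + ((c.toNat : Int) - 48)) a
      = a * 10 ^ n + (10 ^ n - 1) := by
  induction n generalizing a with
  | zero => simp
  | succ k ih =>
      rw [List.replicate_succ, List.foldl_cons, ih]
      push_cast
      ring

lemma pvNines_val (n : Nat) : pvNines n = 10 ^ n - 1 := by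
  unfold pvNines; rw [pvNines_foldl]; ring

lemma int_lcm_cast_of_dvd {a b : Int} (hb : 0 < b) (h : a ∣ b) :
    ((Int.lcm a b : Nat) : Int) = b := by
  rw [Int.lcm, Nat.lcm_eq_right (Int.natAbs_dvd_natAbs.mpr h)]
  exact Int.natAbs_of_nonneg hb.le

lemma int_lcm_one_cast {b : Int} (hb : 0 ≤ b) : ((Int.lcm 1 b : Nat) : Int) = b := by
  rw [Int.lcm, Int.natAbs_one, Nat.lcm_one_left]
  exact Int.natAbs_of_nonneg hb

lemma fdiv_mul_cancel (a b : Int) (hb : b ≠ 0) : PySem.Int.floordiv (a * b) b = a := by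
  unfold PySem.Int.floordiv
  rw [mul_comm, Int.mul_fdiv_cancel_left a hb]

lemma int_lcm_one_right_cast {b : Int} (hb : 0 ≤ b) : ((Int.lcm b 1 : Nat) : Int) = b := by
  rw [Int.lcm, Int.natAbs_one, Nat.lcm_one_right]
  exact Int.natAbs_of_nonneg hb

lemma pvSumFraction_L0 (I : Int) : pvSumFraction [(I, 1), (0, 1), (0, 1)] = pvReduce (I * 1 + 0) 1 := by
  unfold pvSumFraction pvReduce
  simp [PySem.Int.floordiv, Int.gcd_comm 1 I]

lemma pvSumFraction_L1 (I F : Int) (m : Nat) :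
    pvSumFraction [(I, 1), (F, 10 ^ m), (0, 1)] = pvReduce (I * 10 ^ m + F) (10 ^ m) := by
  have hm : (0 : Int) < 10 ^ m := by positivity
  unfold pvSumFraction
  simp only [List.foldl_cons, List.foldl_nil, List.map_cons, List.map_nil, List.sum_cons,
    List.sum_nil]
  rw [int_lcm_one_cast hm.le, int_lcm_one_right_cast hm.le, fdiv_mul_cancel F _ hm.ne']
  unfold pvReduce
  simp only [PySem.Int.floordiv, Int.fdiv_one, zero_mul, add_zero]
  rw [Int.gcd_comm (10 ^ m : Int)]

lemma pvSumFraction_L2 (I P Q N : Int) (m : Nat) (hN : 0 < N) :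
    pvSumFraction [(I, 1), (P, 10 ^ m), (Q, N * 10 ^ m)] =
      pvReduce (I * (N * 10 ^ m) + P * N + Q) (N * 10 ^ m) := by
  have hm : (0 : Int) < 10 ^ m := by positivity
  have hNm : (0 : Int) < N * 10 ^ m := by positivity
  unfold pvSumFraction
  simp only [List.foldl_cons, List.foldl_nil, List.map_cons, List.map_nil, List.sum_cons,
    List.sum_nil]
  rw [int_lcm_one_cast hm.le, int_lcm_cast_of_dvd hNm (Dvd.intro_left N rfl)]
  have hP : P * (N * 10 ^ m) = (P * N) * 10 ^ m := by ring
  rw [hP, fdiv_mul_cancel (P * N) _ hm.ne', fdiv_mul_cancel Q _ hNm.ne']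
  unfold pvReduce
  simp only [PySem.Int.floordiv, Int.fdiv_one, add_zero]
  rw [Int.gcd_comm (N * 10 ^ m : Int)]
  ring_nf

theorem dtf_eq (st : String) (hpre : Pre_decimal_to_fraction st) :
    decimal_to_fraction st = decimal_to_fraction_alt st := by
  unfold Pre_decimal_to_fraction at hpre
  unfold decimal_to_fraction decimal_to_fraction_alt
  by_cases hdot : PySem.Str.isIn "." st = true
  · simp only [hdot, if_true] at hpre ⊢
    set lst := (PySem.Str.split? st ".").getD [] with hlst
    set l0 := lst.headD "" with hl0
    set l1 := (PySem.List.pyGet? lst 1).getD "" with hl1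
    obtain ⟨hpre0, hpre1⟩ := hpre
    obtain ⟨I, hIA, hIB⟩ :
        ∃ I : Int,
          (if l0 ≠ "" then ((PySem.Int.ofStr? l0).getD 0, (1 : Int)) else (0, 1)) = (I, 1) ∧
          (if l0 ≠ "" then (PySem.Int.ofStr? l0).getD 0 else 0) = I := by
      by_cases h0 : l0 ≠ "" <;> simp [h0]
    rw [hIA, hIB]
    by_cases hpar : PySem.Str.isIn "(" l1 = true
    · simp only [hpar, if_true, Bool.true_eq_false, if_false] at hpre1 ⊢
      obtain ⟨hcount, hprePre, hpost⟩ := hpre1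
      set parts := (PySem.Str.split? l1 "(").getD [] with hparts
      set pre := parts.headD "" with hpre'
      set post' := PySem.Str.slice ((PySem.List.pyGet? parts 1).getD "") none (some (-1)) with hpost'
      set n := (PySem.Str.len post').toNat with hn
      set N := pvNines n with hNdef
      set Q := (PySem.Int.ofStr? post').getD 0 with hQ
      have hlen : 1 ≤ n := by
        by_contra hc
        have h0 : post'.toList.length = 0 := by
          rw [hn] at hc
          simp only [PySem.Str.len] at hc
          omega
        have hnil : post'.toList = [] := List.length_eq_zero_iff.mp h0
        rw [show PySem.Int.ofStr? post' = PySem.Int.ofChars? post'.toList from rfl, hnil] at hpost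
        exact absurd hpost (by decide)
      have hN : 0 < N := by
        rw [hNdef, pvNines_val]
        have h10 : (10 : Int) ^ 1 ≤ 10 ^ n := pow_le_pow_right₀ (by norm_num) hlen
        norm_num at h10
        linarith
      by_cases hp0 : pre = ""
      · simp only [hp0, ne_eq, not_true_eq_false, if_false]
        rw [show ((0 : Int), (1 : Int)) = ((0 : Int), (10 : Int) ^ (PySem.Str.len "").toNat) from by norm_num [PySem.Str.len]]
        rw [pvSumFraction_L2 I 0 Q N _ hN]
        unfold pvReduce
        rfl
      · simp only [hp0, ne_eq, not_false_eq_true, if_true]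
        rw [pvSumFraction_L2 I ((PySem.Int.ofStr? pre).getD 0) Q N _ hN]
        unfold pvReduce
        rfl
    · have hparf : PySem.Str.isIn "(" l1 = false := by
        cases hb : PySem.Str.isIn "(" l1
        · rfl
        · exact absurd hb hpar
      simp only [hparf, Bool.false_eq_true, if_false, if_true] at hpre1 ⊢
      by_cases h1 : l1 = ""
      · simp only [h1, ne_eq, not_true_eq_false, if_false]
        rw [pvSumFraction_L0]
        unfold pvReduce
        rfl
      · simp only [h1, ne_eq, not_false_eq_true, if_true]
        rw [pvSumFraction_L1]
        unfold pvReduce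
        rfl
  · simp only [eq_false hdot, reduceIte] at hpre ⊢
    rw [pvSumFraction_L0]
    unfold pvReduce
    norm_num

-- ===== VERDICT (by name: the statement is the Claim_ definition above) =====
theorem decimal_to_fraction_spec : Claim_equal_decimal_to_fraction := by
  intro st _ hpre
  unfold Spec_decimal_to_fraction
  exact dtf_eq st hpre
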